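-- pv_equiv track=rewrite | github.com/Yuchan45/TP-Grupal-Trebol | modulos/generador_csv.py | buscar_autor
-- ===== SOURCE A (Python) =====
-- comentario_multiple = chr(34) + chr(34) + chr(34)
--
-- def buscar_autor(lista_comentarios):
--     """[Autor: Tomas Yu Nakasone]
--        [Ayuda: Recibe una lista con comentarios y devuelve el autor en caso de existir]
--     """
--     autor = 0
--     for k in range(len(lista_comentarios)):
--         if "autor:" in lista_comentarios[k].lower():
--             devolver = lista_comentarios[k].lstrip(" ").rstrip("\n").lstrip(comentario_multiple)
--             autor += 1
--     if autor < 1: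
--         devolver = "[Autor: Sin autor]"
--     return devolver
-- ===== SOURCE B (Python) =====
-- comentario_multiple = chr(34) + chr(34) + chr(34)
--
-- def buscar_autor(lista_comentarios):
--     for line in reversed(lista_comentarios):
--         if "autor:" in line.lower():
--             return line.lstrip(" ").rstrip("\n").lstrip(comentario_multiple)
--     return "[Autor: Sin autor]"
-- ===== Notes on version B (the rewrite author's own statement) =====
-- stated objective: idiomatic
-- what changed: Replaces the index loop with a match counter and overwrite-the-last idiom by a reverse traversal that returns the first (i.e. last) matching line immediately, dropping the counter and the unbound-variable pattern.
import Mathlib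
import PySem

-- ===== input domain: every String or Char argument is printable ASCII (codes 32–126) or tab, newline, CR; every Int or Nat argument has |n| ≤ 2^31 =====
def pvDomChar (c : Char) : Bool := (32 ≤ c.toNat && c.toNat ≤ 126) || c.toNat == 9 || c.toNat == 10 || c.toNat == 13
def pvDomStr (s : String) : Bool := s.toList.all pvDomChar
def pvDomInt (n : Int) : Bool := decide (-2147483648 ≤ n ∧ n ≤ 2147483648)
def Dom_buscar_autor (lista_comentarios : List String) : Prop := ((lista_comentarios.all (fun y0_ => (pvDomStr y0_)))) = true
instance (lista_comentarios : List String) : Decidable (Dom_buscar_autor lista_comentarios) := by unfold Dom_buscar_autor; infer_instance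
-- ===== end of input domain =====

-- B replaces A's count-and-overwrite index loop by an idiomatic reverse traversal with early return; same last-match result.

-- shared helper: line.lstrip(" ").rstrip("\n").lstrip('"""') — one-sided strip with an explicit char set
-- has no PySem primitive, ported by hand, exact: lstrip(cs) drops leading chars of cs, rstrip(cs) trailing ones.
def pvProcess (s : String) : String :=
  String.ofList
    (((((s.toList.dropWhile (· == ' ')).reverse.dropWhile (· == '\n')).reverse).dropWhile (· == '"')))

-- ===== PORT A =====
def buscar_autor (lista_comentarios : List String) : String :=
  let st : Int × Option String :=
    (PySem.List.pyRange 0 (lista_comentarios.length : Int) 1).foldl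
      (fun (st : Int × Option String) k =>
        let s := PySem.List.pyGetD lista_comentarios k ""
        if PySem.Str.isIn "autor:" (PySem.Str.lower s) then
          (st.1 + 1, some (pvProcess s))
        else st)
      (0, none)
  if st.1 < 1 then "[Autor: Sin autor]" else st.2.getD ""

-- ===== PORT B =====
def buscar_autor_alt (lista_comentarios : List String) : String :=
  match lista_comentarios.reverse.find? (fun s => PySem.Str.isIn "autor:" (PySem.Str.lower s)) with
  | some s => pvProcess s
  | none => "[Autor: Sin autor]"

-- ===== PRECONDITION & SPEC =====
def Spec_buscar_autor (lista_comentarios : List String) (out : String) : Prop := out = buscar_autor_alt lista_comentarios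
instance (lista_comentarios : List String) (out : String) : Decidable (Spec_buscar_autor lista_comentarios out) := by unfold Spec_buscar_autor; infer_instance

-- ===== CLAIM (what is proved, stated in full; the proofs are below) =====
def Claim_equal_buscar_autor : Prop := ∀ (lista_comentarios : List String), Dom_buscar_autor lista_comentarios → Spec_buscar_autor lista_comentarios (buscar_autor lista_comentarios)

-- ===== LEMMAS AND PROOFS =====

-- A's loop state after the scan: (number of matches so far, image of the last match so far)
theorem pv_loop_eq (p : String → Bool) (g : String → String) (xs : List String)
    (n : Int) (o : Option String) :
    xs.foldl (fun (st : Int × Option String) s =>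
        if p s then (st.1 + 1, some (g s)) else st) (n, o)
      = (n + (xs.countP p : Int),
         match xs.reverse.find? p with
         | some s => some (g s)
         | none => o) := by
  induction xs generalizing n o with
  | nil => simp
  | cons x xs ih =>
    simp only [List.foldl_cons, List.countP_cons, List.reverse_cons, List.find?_append]
    by_cases hx : p x
    · rw [if_pos hx, ih]
      rcases hfind : xs.reverse.find? p with _ | s <;>
        · simp only [Prod.mk.injEq]
          refine ⟨by push_cast; simp [hx]; try omega, by simp [hx]⟩
    · rw [if_neg hx, ih]
      rcases hfind : xs.reverse.find? p with _ | s <;>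
        · simp only [Prod.mk.injEq]
          refine ⟨by push_cast; simp [hx]; try omega, by simp [hx]⟩

theorem pv_count_zero_iff (p : String → Bool) (xs : List String) :
    xs.countP p = 0 ↔ xs.reverse.find? p = none := by
  rw [List.countP_eq_zero, List.find?_eq_none]
  simp

-- ===== VERDICT (by name: the statement is the Claim_ definition above) =====
theorem buscar_autor_spec : Claim_equal_buscar_autor := by
  intro xs _
  show buscar_autor xs = buscar_autor_alt xs
  unfold buscar_autor buscar_autor_alt
  simp only []
  rw [show (PySem.List.pyRange 0 (xs.length : Int) 1) = PySem.List.pyRange 0 (PySem.List.len xs) 1 by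
        simp [PySem.List.len_eq]]
  rw [PySem.List.foldl_pyRange_zero_pyGetD xs ""
      (fun (st : Int × Option String) s =>
        if PySem.Str.isIn "autor:" (PySem.Str.lower s) then (st.1 + 1, some (pvProcess s)) else st)
      (0, none)]
  rw [pv_loop_eq]
  rcases hfind : xs.reverse.find? (fun s => PySem.Str.isIn "autor:" (PySem.Str.lower s)) with _ | s
  · have h0 : xs.countP (fun s => PySem.Str.isIn "autor:" (PySem.Str.lower s)) = 0 :=
      (pv_count_zero_iff _ xs).2 hfind
    rw [if_pos (by rw [h0]; norm_num)]
  · have h0 : xs.countP (fun s => PySem.Str.isIn "autor:" (PySem.Str.lower s)) ≠ 0 := by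
      intro h; rw [pv_count_zero_iff] at h; rw [h] at hfind; cases hfind
    rw [if_neg (by omega), Option.getD_some]
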